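-- pv_equiv track=rewrite | github.com/aldhomeidy/IPv4Screening | function.py | biner_prefix
-- ===== SOURCE A (Python) =====
-- def biner_prefix(prefix):
--     biner = ""
--     x = 1
--     while x <= prefix:
--         biner += "1"
--         x += 1
--
--     # mendapatkan sisa prefix dari IPv4, total maks prefixnya adalah 32
--     sisa_prefix = 32-prefix
--     # list untuk menampung biner tiap blok
--     hasil = []
--     # cek apakah jumlah prefix nya 32, jika iya maka proses berhenti dan tampilkan prefix biner nya
--     kondisi = False
--     while kondisi == False:
--         if sisa_prefix == 0:
--             kondisi = True
--         else:
--             # tambahkan biner 0 sebanyak sisa kekurangan prefix agar lengkap menjadi 32 bit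
--             for x in range(1, sisa_prefix+1):
--                 biner += "0"
--
--             # pecah biner yang dihasilkan setiap 8 karakter dan masukan ke list hasil
--             hasil.append(biner[0:8])
--             hasil.append(biner[8:16])
--             hasil.append(biner[16:24])
--             hasil.append(biner[24:32])
--             kondisi = True
--     # kembalikan variabel hasil
--     return hasil
-- ===== SOURCE B (Python) =====
-- def biner_prefix(prefix):
--     hasil = []
--     for i in range(4):
--         ones = min(max(prefix - 8 * i, 0), 8)
--         hasil.append("1" * ones + "0" * (8 - ones))
--     return hasil
-- ===== Notes on version B (the rewrite author's own statement) =====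
-- stated objective: faster
-- what changed: B computes each octet directly as min(max(prefix-8i,0),8) ones padded with zeros in a single loop over the octets, instead of A's character-by-character while-loop that appends one '1' per prefix unit and then slices a bitstring; B also drops A's accidental empty result at prefix 32.
-- intended difference: On prefix == 32 A returns [] (its kondisi loop stops before ever appending the octets), while B returns ['11111111','11111111','11111111','11111111'], the /32 netmask the function is meant to produce. — e.g. on biner_prefix(32): A returns [], B returns ["11111111", "11111111", "11111111", "11111111"]
import Mathlib
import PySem

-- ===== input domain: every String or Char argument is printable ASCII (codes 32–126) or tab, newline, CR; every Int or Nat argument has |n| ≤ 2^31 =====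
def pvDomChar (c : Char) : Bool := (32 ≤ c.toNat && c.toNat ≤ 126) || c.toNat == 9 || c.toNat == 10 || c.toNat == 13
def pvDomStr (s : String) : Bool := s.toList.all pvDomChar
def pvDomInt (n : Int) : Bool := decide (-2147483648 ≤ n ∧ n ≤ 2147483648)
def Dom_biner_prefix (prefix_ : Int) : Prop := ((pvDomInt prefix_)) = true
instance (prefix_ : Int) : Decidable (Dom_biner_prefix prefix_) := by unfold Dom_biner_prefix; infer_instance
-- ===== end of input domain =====

-- B builds each octet directly from min(max(prefix-8i,0),8) set bits instead of A's per-character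
-- while-loop plus 32-char string slicing; B returns the intended four-octet /32 mask where A returns [].

-- ===== PORT A =====
-- 'while x <= prefix: biner += "1"; x += 1'
def pvOnesLoop (prefix_ : Int) (x : Int) (biner : List Char) : List Char :=
  if x ≤ prefix_ then pvOnesLoop prefix_ (x + 1) (biner ++ ['1']) else biner
termination_by (prefix_ + 1 - x).toNat
decreasing_by omega

def biner_prefix (prefix_ : Int) : List String :=
  let biner := pvOnesLoop prefix_ 1 []
  let sisa_prefix := 32 - prefix_
  -- the 'while kondisi == False' loop runs exactly one iteration of its body
  if sisa_prefix = 0 then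
    []
  else
    let biner := (PySem.List.pyRange 1 (sisa_prefix + 1) 1).foldl (fun b _ => b ++ ['0']) biner
    [String.ofList (PySem.List.slice biner (some 0) (some 8)),
     String.ofList (PySem.List.slice biner (some 8) (some 16)),
     String.ofList (PySem.List.slice biner (some 16) (some 24)),
     String.ofList (PySem.List.slice biner (some 24) (some 32))]

-- ===== PORT B =====
def pvOctet (prefix_ : Int) (i : Int) : String :=
  let ones := min (max (prefix_ - 8 * i) 0) 8
  String.ofList (List.replicate ones.toNat '1' ++ List.replicate (8 - ones).toNat '0')

def biner_prefix_alt (prefix_ : Int) : List String :=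
  (PySem.List.pyRange 0 4 1).foldl (fun hasil i => hasil ++ [pvOctet prefix_ i]) []

-- ===== PRECONDITION & SPEC =====
-- On prefix == 32 A returns [] (its kondisi loop stops before ever appending the octets), while B
-- returns ["11111111","11111111","11111111","11111111"], the /32 netmask the function is meant to produce.
def D_biner_prefix (prefix_ : Int) : Prop := prefix_ = 32
instance (prefix_ : Int) : Decidable (D_biner_prefix prefix_) := by unfold D_biner_prefix; infer_instance

def Spec_biner_prefix (prefix_ : Int) (out : List String) : Prop :=
  ¬ D_biner_prefix prefix_ → out = biner_prefix_alt prefix_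
instance (prefix_ : Int) (out : List String) : Decidable (Spec_biner_prefix prefix_ out) := by
  unfold Spec_biner_prefix; infer_instance

def pvDiffWitness_biner_prefix : Int := 32
def pvDiffWitnessOut_biner_prefix : (List String) × (List String) :=
  ([], ["11111111", "11111111", "11111111", "11111111"])

-- ===== CLAIM (what is proved, stated in full; the proofs are below) =====
def Claim_unchanged_biner_prefix : Prop :=
  ∀ (prefix_ : Int), Dom_biner_prefix prefix_ → Spec_biner_prefix prefix_ (biner_prefix prefix_)
def Claim_changed_biner_prefix : Prop :=
  Dom_biner_prefix (pvDiffWitness_biner_prefix) ∧ D_biner_prefix (pvDiffWitness_biner_prefix) ∧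
  biner_prefix (pvDiffWitness_biner_prefix) = pvDiffWitnessOut_biner_prefix.1 ∧
  biner_prefix_alt (pvDiffWitness_biner_prefix) = pvDiffWitnessOut_biner_prefix.2 ∧
  pvDiffWitnessOut_biner_prefix.1 ≠ pvDiffWitnessOut_biner_prefix.2
def Claim_exact_biner_prefix : Prop :=
  ∀ (prefix_ : Int), Dom_biner_prefix prefix_ → D_biner_prefix prefix_ →
    biner_prefix prefix_ ≠ biner_prefix_alt prefix_

-- ===== LEMMAS AND PROOFS =====

-- A's ones loop appends one '1' per remaining counter value.
theorem pvOnesLoop_eq (prefix_ x : Int) (biner : List Char) :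
    pvOnesLoop prefix_ x biner = biner ++ List.replicate (prefix_ + 1 - x).toNat '1' := by
  fun_induction pvOnesLoop prefix_ x biner with
  | case1 x b h ih =>
      rw [ih]
      have h1 : (prefix_ + 1 - x).toNat = (prefix_ + 1 - (x + 1)).toNat + 1 := by omega
      simp [h1, List.replicate_succ]
  | case2 x b h =>
      have h1 : (prefix_ + 1 - x).toNat = 0 := by omega
      simp [h1]

-- an 8-char window of (a ones ++ z zeros), entirely inside the 32-bit string
theorem pvWindow (a z m : Nat) (h : m + 8 ≤ a + z) :
    ((List.replicate a '1' ++ List.replicate z '0').drop m).take 8 =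
      List.replicate (min (a - m) 8) '1' ++ List.replicate (8 - min (a - m) 8) '0' := by
  rw [List.drop_append, List.take_append]
  simp only [List.drop_replicate, List.take_replicate, List.length_replicate]
  congr 1 <;> congr 1 <;> omega

-- B is the list of its four octets.
theorem biner_prefix_alt_eq (p : Int) :
    biner_prefix_alt p = [pvOctet p 0, pvOctet p 1, pvOctet p 2, pvOctet p 3] := by
  have h : PySem.List.pyRange 0 4 1 = [0, 1, 2, 3] := by decide
  simp [biner_prefix_alt, h, List.foldl]

-- one octet of A's sliced bitstring equals B's octet (k = 0,1,2,3; m = 8k)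
theorem pvOctet_eq (p k : Int) (m : Nat) (hm : (m : Int) = 8 * k) (_hk0 : 0 ≤ k) (hk : k < 4) :
    String.ofList ((((List.replicate p.toNat '1' ++ List.replicate (32 - p).toNat '0')).drop m).take 8)
      = pvOctet p k := by
  rw [pvWindow p.toNat (32 - p).toNat m (by omega)]
  unfold pvOctet
  have e1 : (min (max (p - 8 * k) 0) 8).toNat = min (p.toNat - m) 8 := by omega
  have e2 : (8 - min (max (p - 8 * k) 0) 8).toNat = 8 - min (p.toNat - m) 8 := by omega
  simp only [e1, e2]

theorem biner_prefix_spec : Claim_unchanged_biner_prefix := by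
  intro p _ hD
  have hp : p ≠ 32 := hD
  have hsisa : ¬ (32 - p = 0) := by omega
  unfold biner_prefix
  simp only [hsisa, if_false]
  rw [pvOnesLoop_eq]
  have hlen : (PySem.List.pyRange 1 (32 - p + 1) 1).length = (32 - p).toNat := by
    rw [PySem.List.length_pyRange_one]; omega
  have hfold : ∀ (l : List Int) (init : List Char),
      l.foldl (fun b _ => b ++ ['0']) init = init ++ List.replicate l.length '0' := by
    intro l init; induction l generalizing init with
    | nil => simp
    | cons x xs ih => simp [List.foldl, ih, List.replicate_succ, List.append_assoc]
  rw [hfold, hlen]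
  simp only [List.nil_append]
  have h1 : (p + 1 - 1) = p := by omega
  rw [h1]
  rw [PySem.List.slice_toNat _ (by norm_num) (by norm_num),
      PySem.List.slice_toNat _ (by norm_num) (by norm_num),
      PySem.List.slice_toNat _ (by norm_num) (by norm_num),
      PySem.List.slice_toNat _ (by norm_num) (by norm_num)]
  norm_num
  rw [biner_prefix_alt_eq]
  have e0 := pvOctet_eq p 0 0 (by norm_num) (by norm_num) (by norm_num)
  simp only [List.drop_zero] at e0
  rw [← e0,
      ← pvOctet_eq p 1 8 (by norm_num) (by norm_num) (by norm_num),
      ← pvOctet_eq p 2 16 (by norm_num) (by norm_num) (by norm_num),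
      ← pvOctet_eq p 3 24 (by norm_num) (by norm_num) (by norm_num)]
  simp only [List.cons.injEq, and_true]
  exact ⟨rfl, rfl, rfl, rfl⟩

theorem biner_prefix_changed : Claim_changed_biner_prefix := by
  unfold Claim_changed_biner_prefix; decide

theorem biner_prefix_tight : Claim_exact_biner_prefix := by
  intro p _ hD
  subst hD
  decide
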